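-- pv_equiv track=rewrite | github.com/hatttoomma/rllm | examples/mmsearch_train/reward/ttrl.py | _select_majority_prediction
-- ===== SOURCE A (Python) =====
-- from collections import Counter, defaultdict
-- from collections.abc import Sequence
--
-- def _select_majority_prediction(predictions: Sequence[str]) -> str:
--     if not predictions:
--         return ""
--
--     counts = Counter(predictions)
--     first_seen_idx: dict[str, int] = {}
--     for idx, prediction in enumerate(predictions):
--         first_seen_idx.setdefault(prediction, idx)
--
--     return max(counts, key=lambda prediction: (counts[prediction], -first_seen_idx[prediction]))
-- ===== SOURCE B (Python) =====
-- def _select_majority_prediction(predictions):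
--     counts = {}
--     first_seen = {}
--     best = ""
--     best_key = None
--     for idx, pred in enumerate(predictions):
--         first_seen.setdefault(pred, idx)
--         c = counts.get(pred, 0) + 1
--         counts[pred] = c
--         key = (c, -first_seen[pred])
--         if best_key is None or key > best_key:
--             best_key = key
--             best = pred
--     return best
-- ===== Notes on version B (the rewrite author's own statement) =====
-- stated objective: alternative
-- what changed: Replaces A's two-pass scheme (build Counter and first-seen dict, then max over the dict keys with a tuple key) by a single streaming pass that updates counts/first-seen per element and keeps a running best element with its (count, -first_seen) key, updating on strict tuple improvement.
import Mathlib
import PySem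

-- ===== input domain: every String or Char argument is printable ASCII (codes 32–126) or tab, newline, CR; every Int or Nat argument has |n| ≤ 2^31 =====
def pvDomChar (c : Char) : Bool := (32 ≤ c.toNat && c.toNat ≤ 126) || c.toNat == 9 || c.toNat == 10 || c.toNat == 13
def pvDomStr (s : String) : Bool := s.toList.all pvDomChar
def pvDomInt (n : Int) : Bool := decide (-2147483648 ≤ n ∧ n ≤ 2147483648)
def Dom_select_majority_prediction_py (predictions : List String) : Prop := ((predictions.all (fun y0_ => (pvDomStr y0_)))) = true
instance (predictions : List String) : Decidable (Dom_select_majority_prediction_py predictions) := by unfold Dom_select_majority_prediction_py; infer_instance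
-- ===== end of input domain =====

-- B replaces A's two passes (Counter + first-seen dict, then max over the keys) by one
-- streaming pass keeping a running best element and its (count, -first_seen) key (objective: alternative).

-- ===== PORT A =====
def select_majority_prediction_py (predictions : List String) : String :=
  if predictions = [] then ""
  else
    let counts := PySem.Dict.counter predictions
    let first_seen :=
      (PySem.List.enumerate predictions 0).foldl
        (fun d ip => d.setdefault ip.2 ip.1) (PySem.Dict.empty : PySem.Dict String Int)
    -- Python's max raises on an empty iterable; counts.keys is nonempty here, so the
    -- .getD "" default is never reached.
    (PySem.List.max2? counts.keys
        (fun p => counts.getD p 0)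
        (fun p => -(first_seen.getD p 0))).getD ""

-- ===== PORT B =====
def select_majority_prediction_py_altStep
    (st : PySem.Dict String Int × PySem.Dict String Int × Option (Int × Int) × String)
    (ip : Int × String) :
    PySem.Dict String Int × PySem.Dict String Int × Option (Int × Int) × String :=
  let counts := st.1
  let first_seen := st.2.1
  let best_key := st.2.2.1
  let best := st.2.2.2
  let first_seen' := first_seen.setdefault ip.2 ip.1
  let c := counts.getD ip.2 0 + 1
  let counts' := counts.insert ip.2 c
  let key : Int × Int := (c, -(first_seen'.getD ip.2 0))
  -- 'best_key is None or key > best_key' with Python's lexicographic tuple comparison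
  if (match best_key with
      | none => true
      | some bk => decide (bk.1 < key.1) || (decide (bk.1 = key.1) && decide (bk.2 < key.2)))
  then (counts', first_seen', some key, ip.2)
  else (counts', first_seen', best_key, best)

def select_majority_prediction_py_alt (predictions : List String) : String :=
  ((PySem.List.enumerate predictions 0).foldl select_majority_prediction_py_altStep
    ((PySem.Dict.empty : PySem.Dict String Int), (PySem.Dict.empty : PySem.Dict String Int),
      (none : Option (Int × Int)), "")).2.2.2

-- ===== PRECONDITION & SPEC =====
def Spec_select_majority_prediction_py (predictions : List String) (out : String) : Prop := out = select_majority_prediction_py_alt predictions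
instance (predictions : List String) (out : String) : Decidable (Spec_select_majority_prediction_py predictions out) := by unfold Spec_select_majority_prediction_py; infer_instance

-- ===== CLAIM (what is proved, stated in full; the proofs are below) =====
def Claim_equal_select_majority_prediction_py : Prop := ∀ (predictions : List String), Dom_select_majority_prediction_py predictions → Spec_select_majority_prediction_py predictions (select_majority_prediction_py predictions)

-- ===== LEMMAS AND PROOFS =====

/-- First occurrence index of `p` in a list (the proofs' own notion). -/
def pvFIdx : List String → String → Nat
  | [], _ => 0
  | a :: t, p => if a = p then 0 else pvFIdx t p + 1

/-- The key A's and B's comparisons both rank elements by. -/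
def pvKey (xs : List String) (p : String) : Int × Int :=
  ((xs.count p : Int), -(pvFIdx xs p : Int))

/-- Strict lexicographic order on Int pairs (Python's tuple `<`). -/
def pvLex (a b : Int × Int) : Prop := a.1 < b.1 ∨ (a.1 = b.1 ∧ a.2 < b.2)

theorem pvLex_trans {a b c : Int × Int} (h1 : pvLex a b) (h2 : pvLex b c) : pvLex a c := by
  unfold pvLex at *; omega

theorem pvLex_total {a b : Int × Int} (hne : a ≠ b) (h : ¬ pvLex a b) : pvLex b a := by
  rcases a with ⟨a1, a2⟩; rcases b with ⟨b1, b2⟩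
  have hne' : ¬(a1 = b1 ∧ a2 = b2) := fun hh => hne (by rw [hh.1, hh.2])
  unfold pvLex at *
  omega

theorem pvFIdx_append_of_mem {l : List String} {p : String} (h : p ∈ l) (x : String) :
    pvFIdx (l ++ [x]) p = pvFIdx l p := by
  induction l with
  | nil => cases h
  | cons a t ih =>
    simp only [List.cons_append, pvFIdx]
    by_cases hap : a = p
    · rw [if_pos hap, if_pos hap]
    · rw [if_neg hap, if_neg hap]
      rcases List.mem_cons.mp h with h' | h'
      · exact absurd h'.symm hap
      · rw [ih h']

theorem pvFIdx_append_self_of_not_mem {l : List String} {x : String} (h : x ∉ l) :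
    pvFIdx (l ++ [x]) x = l.length := by
  induction l with
  | nil => simp [pvFIdx]
  | cons a t ih =>
    simp only [List.cons_append, pvFIdx, List.length_cons]
    have hax : a ≠ x := fun he => h (he ▸ List.mem_cons_self)
    simp only [hax, if_false]
    rw [ih (fun hm => h (List.mem_cons_of_mem _ hm))]

theorem pvFIdx_inj {l : List String} {p q : String} (hp : p ∈ l) (hq : q ∈ l)
    (h : pvFIdx l p = pvFIdx l q) : p = q := by
  induction l with
  | nil => cases hp
  | cons a t ih =>
    simp only [pvFIdx] at h
    by_cases hap : a = p <;> by_cases haq : a = q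
    · exact hap ▸ haq
    · simp [hap] at h; exact h
    · simp [haq] at h; exact h.symm
    · simp only [hap, haq, if_false] at h
      have hp' : p ∈ t := by rcases List.mem_cons.mp hp with h' | h' <;> [exact absurd h'.symm hap; exact h']
      have hq' : q ∈ t := by rcases List.mem_cons.mp hq with h' | h' <;> [exact absurd h'.symm haq; exact h']
      exact ih hp' hq' (by omega)

theorem pvCount_append (l : List String) (x p : String) :
    (l ++ [x]).count p = l.count p + (if p = x then 1 else 0) := by
  rw [List.count_append, List.count_singleton]
  by_cases h : p = x
  · subst h; simp
  · have hx : (x == p) = false := beq_eq_false_iff_ne.mpr (Ne.symm h)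
    simp [hx, h]

theorem pvKey_append_of_ne {l : List String} {x p : String} (hmem : p ∈ l) (hne : p ≠ x) :
    pvKey (l ++ [x]) p = pvKey l p := by
  unfold pvKey
  rw [pvCount_append, pvFIdx_append_of_mem hmem]
  simp [hne]

/-- Invariant of B's streaming fold over the enumerated prefix `l`. -/
def pvInv (l : List String)
    (st : PySem.Dict String Int × PySem.Dict String Int × Option (Int × Int) × String) : Prop :=
  (∀ p, st.1.getD p 0 = (l.count p : Int)) ∧
  (∀ p, st.2.1.get? p = if p ∈ l then some ((pvFIdx l p : Nat) : Int) else none) ∧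
  (if l = [] then st.2.2 = (none, "")
   else st.2.2.1 = some (pvKey l st.2.2.2) ∧ st.2.2.2 ∈ l ∧
        ∀ p ∈ l, p ≠ st.2.2.2 → pvLex (pvKey l p) (pvKey l st.2.2.2))

theorem pvCond2_iff (a b : Int × Int) :
    ((decide (a.1 < b.1) || (decide (a.1 = b.1) && decide (a.2 < b.2))) = true) ↔ pvLex a b := by
  unfold pvLex
  simp

theorem pvInv_step {l : List String} {st} (h : pvInv l st) (x : String) :
    pvInv (l ++ [x]) (select_majority_prediction_py_altStep st ((l.length : Int), x)) := by
  obtain ⟨C, F, K, b⟩ := st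
  obtain ⟨hC, hF, hB⟩ := h
  have hne : l ++ [x] ≠ [] := by simp
  have hF'x : (F.setdefault x (l.length : Int)).get? x = some ((pvFIdx (l ++ [x]) x : Nat) : Int) := by
    rw [PySem.Dict.get?_setdefault_self]
    by_cases hx : x ∈ l
    · rw [hF x, if_pos hx, pvFIdx_append_of_mem hx]
      rfl
    · rw [hF x, if_neg hx, pvFIdx_append_self_of_not_mem hx]
      rfl
  have hF' : ∀ p, (F.setdefault x (l.length : Int)).get? p
      = if p ∈ l ++ [x] then some ((pvFIdx (l ++ [x]) p : Nat) : Int) else none := by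
    intro p
    by_cases hpx : p = x
    · subst hpx; rw [hF'x, if_pos (by simp)]
    · rw [PySem.Dict.get?_setdefault_of_ne _ _ hpx, hF p]
      have hmem : (p ∈ l ++ [x]) ↔ p ∈ l := by simp [hpx]
      by_cases hpl : p ∈ l
      · rw [if_pos hpl, if_pos (hmem.mpr hpl), pvFIdx_append_of_mem hpl]
      · rw [if_neg hpl, if_neg (fun hh => hpl (hmem.mp hh))]
  have hcx : (C.getD x 0 + 1 : Int) = (((l ++ [x]).count x : Nat) : Int) := by
    rw [hC x, pvCount_append]
    simp
  have hfx : -((F.setdefault x (l.length : Int)).getD x 0) = -((pvFIdx (l ++ [x]) x : Nat) : Int) := by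
    rw [PySem.Dict.getD_eq_get?_getD, hF'x]
    rfl
  have hkeyx : ((C.getD x 0 + 1 : Int), -((F.setdefault x (l.length : Int)).getD x 0)) = pvKey (l ++ [x]) x := by
    unfold pvKey
    rw [hcx, hfx]
  have hC' : ∀ p, (C.insert x (C.getD x 0 + 1)).getD p 0 = (((l ++ [x]).count p : Nat) : Int) := by
    intro p
    rw [PySem.Dict.getD_insert]
    by_cases hpx : p = x
    · subst hpx; rw [if_pos rfl]; exact hcx
    · rw [if_neg hpx, hC p, pvCount_append]; simp [hpx]
  have hkey_ne : ∀ p ∈ l ++ [x], p ≠ x → pvKey (l ++ [x]) p = pvKey l p := by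
    intro p hp hpx
    have hpl : p ∈ l := by
      rcases List.mem_append.mp hp with h' | h'
      · exact h'
      · exact absurd (List.mem_singleton.mp h') hpx
    exact pvKey_append_of_ne hpl hpx
  by_cases hl : l = []
  · subst hl
    simp only at hB
    have hK : K = none := by
      have := congrArg Prod.fst hB; simpa using this
    have hb : b = "" := by
      have := congrArg Prod.snd hB; simpa using this
    subst hK
    simp only [select_majority_prediction_py_altStep]
    simp only [if_true]
    refine ⟨hC', hF', ?_⟩
    rw [if_neg hne]
    refine ⟨by dsimp only; rw [hkeyx], by simp, ?_⟩
    intro p hp hpne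
    dsimp only at hpne
    exact absurd (by simpa using hp) hpne
  · rw [if_neg hl] at hB
    obtain ⟨hK, hbmem, hmax⟩ := hB
    simp only at hK hbmem hmax
    rw [hK]
    simp only [select_majority_prediction_py_altStep]
    by_cases hlex : pvLex (pvKey l b)
        ((C.getD x 0 + 1 : Int), -((F.setdefault x (l.length : Int)).getD x 0))
    · rw [if_pos ((pvCond2_iff _ _).mpr hlex)]
      refine ⟨hC', hF', ?_⟩
      rw [if_neg hne]
      refine ⟨by dsimp only; rw [hkeyx], by simp, ?_⟩
      intro p hp hpne
      dsimp only at hpne ⊢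
      rw [hkey_ne p hp hpne, ← hkeyx]
      by_cases hpb : p = b
      · subst hpb; exact hlex
      · refine pvLex_trans (hmax p ?_ hpb) hlex
        rcases List.mem_append.mp hp with h' | h'
        · exact h'
        · exact absurd (List.mem_singleton.mp h') hpne
    · rw [if_neg (fun hbb => hlex ((pvCond2_iff _ _).mp hbb))]
      have hbx : b ≠ x := by
        intro hbe
        subst hbe
        apply hlex
        rw [hkeyx]
        unfold pvKey pvLex
        rw [pvCount_append, pvFIdx_append_of_mem hbmem]
        simp
      have hkb : pvKey (l ++ [x]) b = pvKey l b := pvKey_append_of_ne hbmem hbx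
      refine ⟨hC', hF', ?_⟩
      rw [if_neg hne]
      refine ⟨by dsimp only; rw [hkb], List.mem_append.mpr (Or.inl hbmem), ?_⟩
      intro p hp hpne
      dsimp only at hpne ⊢
      rw [hkb]
      by_cases hpx : p = x
      · subst hpx
        have hkne : pvKey l b ≠ ((C.getD p 0 + 1 : Int), -((F.setdefault p (l.length : Int)).getD p 0)) := by
          rw [hkeyx]
          intro he
          have h2 := congrArg Prod.snd he
          unfold pvKey at h2
          simp only [neg_inj, Int.natCast_inj] at h2
          have hbf : pvFIdx (l ++ [p]) b = pvFIdx (l ++ [p]) p := by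
            rw [pvFIdx_append_of_mem hbmem]
            exact h2
          exact hbx (pvFIdx_inj (List.mem_append.mpr (Or.inl hbmem)) (by simp) hbf)
        rw [← hkeyx]
        exact pvLex_total hkne hlex
      · rw [hkey_ne p hp hpx]
        refine hmax p ?_ hpne
        rcases List.mem_append.mp hp with h' | h'
        · exact h'
        · exact absurd (List.mem_singleton.mp h') hpx

theorem pvInv_fold (l : List String) :
    pvInv l ((PySem.List.enumerate l 0).foldl select_majority_prediction_py_altStep
      ((PySem.Dict.empty : PySem.Dict String Int), (PySem.Dict.empty : PySem.Dict String Int),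
        (none : Option (Int × Int)), "")) := by
  induction l using List.reverseRecOn with
  | nil =>
    refine ⟨?_, ?_, ?_⟩
    · intro p; simp [PySem.List.enumerate_nil, PySem.Dict.getD_empty]
    · intro p; simp [PySem.List.enumerate_nil, PySem.Dict.get?_empty]
    · simp [PySem.List.enumerate_nil]
  | append_singleton l x ih =>
    rw [PySem.List.enumerate_append, List.foldl_append, PySem.List.enumerate_cons,
      PySem.List.enumerate_nil, List.foldl_cons, List.foldl_nil, zero_add]
    exact pvInv_step ih x

theorem pvCond_iff (a1 a2 b1 b2 : Int) :
    ((decide (a1 < b1) || (!decide (b1 < a1) && decide (a2 < b2))) = true) ↔ pvLex (a1, a2) (b1, b2) := by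
  unfold pvLex
  simp only [Bool.or_eq_true, Bool.and_eq_true, Bool.not_eq_true', decide_eq_true_eq,
    decide_eq_false_iff_not]
  omega

theorem pvLex_irrefl (a : Int × Int) : ¬ pvLex a a := by unfold pvLex; omega

/-- The fold inside `max2?` starting from `some m0` returns an element that is
    lex-maximal among `m0` and the scanned list. -/
theorem pvMax2_fold {α : Type} (K1 K2 : α → Int) (xs : List α) :
    ∀ (m0 : α) {m : α},
      List.foldl
        (fun acc x =>
          match acc with
          | none => some x
          | some mm =>
            if (decide (K1 mm < K1 x) || !decide (K1 x < K1 mm) && decide (K2 mm < K2 x)) = true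
            then some x else some mm)
        (some m0) xs = some m →
      (m = m0 ∨ m ∈ xs) ∧ ¬ pvLex (K1 m, K2 m) (K1 m0, K2 m0) ∧
        ∀ p ∈ xs, ¬ pvLex (K1 m, K2 m) (K1 p, K2 p) := by
  induction xs with
  | nil =>
    intro m0 m hm
    simp only [List.foldl_nil, Option.some.injEq] at hm
    subst hm
    exact ⟨Or.inl rfl, pvLex_irrefl _, by simp⟩
  | cons x t ih =>
    intro m0 m hm
    rw [List.foldl_cons] at hm
    dsimp only at hm
    by_cases hc : pvLex (K1 m0, K2 m0) (K1 x, K2 x)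
    · rw [if_pos ((pvCond_iff (K1 m0) (K2 m0) (K1 x) (K2 x)).mpr hc)] at hm
      obtain ⟨hmem, hnm, hall⟩ := ih x hm
      refine ⟨?_, ?_, ?_⟩
      · rcases hmem with h' | h' <;> [exact Or.inr (h' ▸ List.mem_cons_self); exact Or.inr (List.mem_cons_of_mem _ h')]
      · intro hcon
        exact hnm (pvLex_trans hcon hc)
      · intro p hp
        rcases List.mem_cons.mp hp with h' | h' <;> [exact h' ▸ hnm; exact hall p h']
    · rw [if_neg (fun hb => hc ((pvCond_iff (K1 m0) (K2 m0) (K1 x) (K2 x)).mp hb))] at hm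
      obtain ⟨hmem, hnm, hall⟩ := ih m0 hm
      refine ⟨?_, hnm, ?_⟩
      · rcases hmem with h' | h' <;> [exact Or.inl h'; exact Or.inr (List.mem_cons_of_mem _ h')]
      · intro p hp
        rcases List.mem_cons.mp hp with h' | h'
        · subst h'
          intro hcon
          by_cases heq : (K1 m, K2 m) = (K1 m0, K2 m0)
          · exact hc (heq ▸ hcon)
          · exact hc (pvLex_trans (pvLex_total heq hnm) hcon)
        · exact hall p h'

theorem pvMax2_fold_isSome {α : Type} (K1 K2 : α → Int) (xs : List α) :
    ∀ (m0 : α), ∃ m,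
      List.foldl
        (fun acc x =>
          match acc with
          | none => some x
          | some mm =>
            if (decide (K1 mm < K1 x) || !decide (K1 x < K1 mm) && decide (K2 mm < K2 x)) = true
            then some x else some mm)
        (some m0) xs = some m := by
  induction xs with
  | nil => intro m0; exact ⟨m0, rfl⟩
  | cons x t ih =>
    intro m0
    rw [List.foldl_cons]
    dsimp only
    by_cases hb : (decide (K1 m0 < K1 x) || !decide (K1 x < K1 m0) && decide (K2 m0 < K2 x)) = true
    · rw [if_pos hb]; exact ih x
    · rw [if_neg hb]; exact ih m0

theorem pvMax2_spec {α : Type} (K1 : α → Int) (K2 : α → Int) (xs : List α) {e : α}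
    (hne : xs ≠ []) (hmem : e ∈ xs)
    (hbest : ∀ p ∈ xs, p ≠ e → pvLex (K1 p, K2 p) (K1 e, K2 e)) :
    PySem.List.max2? xs K1 K2 = some e := by
  obtain ⟨y, t, rfl⟩ := List.exists_cons_of_ne_nil hne
  unfold PySem.List.max2?
  rw [List.foldl_cons]
  show List.foldl _ (some y) t = some e
  obtain ⟨m, hm⟩ := pvMax2_fold_isSome K1 K2 t y
  obtain ⟨hmm, hnm, hall⟩ := pvMax2_fold K1 K2 t y hm
  have hmxs : m ∈ y :: t := by
    rcases hmm with h' | h' <;> [exact h' ▸ List.mem_cons_self; exact List.mem_cons_of_mem _ h']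
  have hme : m = e := by
    by_contra hmne
    have hlex := hbest m hmxs hmne
    rcases List.mem_cons.mp hmem with h' | h'
    · exact (h' ▸ hnm) hlex
    · exact hall e h' hlex
  exact hme ▸ hm

theorem pvSetdefault_fold (l : List String) :
    ∀ (s : Int) (d : PySem.Dict String Int) (p : String),
      ((PySem.List.enumerate l s).foldl (fun d ip => d.setdefault ip.2 ip.1) d).get? p
      = if (d.get? p).isSome then d.get? p
        else if p ∈ l then some (s + (pvFIdx l p : Int)) else none := by
  induction l with
  | nil =>
    intro s d p
    cases hd : d.get? p <;> simp [PySem.List.enumerate_nil, hd]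
  | cons a t ih =>
    intro s d p
    rw [PySem.List.enumerate_cons, List.foldl_cons, ih]
    dsimp only
    by_cases hp : (d.get? p).isSome
    · have hc : d.contains p = true := by
        rw [PySem.Dict.contains_eq_isSome_get?]; exact hp
      by_cases hpa : p = a
      · subst hpa
        rw [PySem.Dict.get?_setdefault_self]
        obtain ⟨v, hv⟩ := Option.isSome_iff_exists.mp hp
        simp [hv]
      · rw [PySem.Dict.get?_setdefault_of_ne _ _ hpa]
        simp [hp]
    · by_cases hpa : p = a
      · subst hpa
        rw [PySem.Dict.get?_setdefault_self]
        have hd : d.get? p = none := Option.not_isSome_iff_eq_none.mp hp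
        simp [hd, pvFIdx]
      · rw [PySem.Dict.get?_setdefault_of_ne _ _ hpa]
        have hd : d.get? p = none := Option.not_isSome_iff_eq_none.mp hp
        have hmem : (p ∈ a :: t) ↔ (p ∈ t) := by
          constructor
          · intro h; rcases List.mem_cons.mp h with h' | h' <;> [exact absurd h' hpa; exact h']
          · exact List.mem_cons_of_mem a
        simp only [hd, Option.isSome_none, Bool.false_eq_true, if_false, hmem, pvFIdx,
          if_neg (fun he : a = p => hpa he.symm)]
        by_cases hpt : p ∈ t
        · rw [if_pos hpt, if_pos hpt]
          congr 1
          push_cast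
          ring
        · rw [if_neg hpt, if_neg hpt]

theorem pvFirstSeen_fold (l : List String) :
    ∀ p, ((PySem.List.enumerate l 0).foldl (fun d ip => d.setdefault ip.2 ip.1)
        (PySem.Dict.empty : PySem.Dict String Int)).get? p
      = if p ∈ l then some ((pvFIdx l p : Nat) : Int) else none := by
  intro p
  rw [pvSetdefault_fold]
  simp [PySem.Dict.get?_empty]

-- ===== VERDICT (by name: the statement is the Claim_ definition above) =====
theorem select_majority_prediction_py_spec : Claim_equal_select_majority_prediction_py := by
  unfold Claim_equal_select_majority_prediction_py
  intro predictions _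
  unfold Spec_select_majority_prediction_py
  by_cases hnil : predictions = []
  · subst hnil; rfl
  · have hA : select_majority_prediction_py predictions
        = (PySem.List.max2? (PySem.Dict.counter predictions).keys
            (fun p => (PySem.Dict.counter predictions).getD p 0)
            (fun p => -(((PySem.List.enumerate predictions 0).foldl
                (fun d ip => d.setdefault ip.2 ip.1)
                (PySem.Dict.empty : PySem.Dict String Int)).getD p 0))).getD "" := by
      unfold select_majority_prediction_py
      rw [if_neg hnil]
    obtain ⟨hC, hF, hB⟩ := pvInv_fold predictions
    rw [if_neg hnil] at hB
    obtain ⟨hK, hbmem, hmax⟩ := hB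
    have hkeys : (PySem.Dict.counter predictions).keys = PySem.Set.ofList predictions :=
      PySem.Dict.keys_counter predictions
    have hkeysne : (PySem.Dict.counter predictions).keys ≠ [] := by
      obtain ⟨y, t, rfl⟩ := List.exists_cons_of_ne_nil hnil
      rw [hkeys]
      exact List.ne_nil_of_mem ((PySem.Set.mem_ofList _ y).mpr List.mem_cons_self)
    have hfirst := pvFirstSeen_fold predictions
    have hKpair : ∀ p ∈ predictions,
        (((PySem.Dict.counter predictions).getD p 0 : Int),
          -(((PySem.List.enumerate predictions 0).foldl
              (fun d ip => d.setdefault ip.2 ip.1)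
              (PySem.Dict.empty : PySem.Dict String Int)).getD p 0))
        = pvKey predictions p := by
      intro p hp
      unfold pvKey
      rw [PySem.Dict.getD_counter, PySem.Dict.getD_eq_get?_getD, hfirst p, if_pos hp]
      rfl
    rw [hA, pvMax2_spec _ _ _ hkeysne
      (e := ((PySem.List.enumerate predictions 0).foldl select_majority_prediction_py_altStep
        ((PySem.Dict.empty : PySem.Dict String Int), (PySem.Dict.empty : PySem.Dict String Int),
          (none : Option (Int × Int)), "")).2.2.2)
      (by rw [hkeys]; exact (PySem.Set.mem_ofList _ _).mpr hbmem)
      (by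
        intro p hp hpne
        have hp' : p ∈ predictions := (PySem.Set.mem_ofList _ _).mp (hkeys ▸ hp)
        rw [hKpair p hp', hKpair _ hbmem]
        exact hmax p hp' hpne)]
    rfl
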